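-- pv_equiv track=rewrite | github.com/swe-ta-gup-ta/DSAandCP | DSA/Practice/new.py | countUniqueXORTriplets
-- ===== SOURCE A (Python) =====
-- def countUniqueXORTriplets(nums):
--     seen = set()
--     n = len(nums)
--     for i in range(n):
--         xor_sum = 0
--         for j in range(i, n):
--             xor_sum ^= nums[j]
--             seen.add(xor_sum)
--     return len(seen)
-- ===== SOURCE B (Python) =====
-- def countUniqueXORTriplets(nums):
--     # Build prefix-XOR table first, then collect pairwise XORs of table entries.
--     prefix = [0]
--     for x in nums:
--         prefix.append(prefix[-1] ^ x)
--     n = len(prefix)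
--     seen = set()
--     for a in range(n):
--         for b in range(a + 1, n):
--             seen.add(prefix[a] ^ prefix[b])
--     return len(seen)
-- ===== Notes on version B (the rewrite author's own statement) =====
-- stated objective: alternative
-- what changed: Replaces the incremental inner XOR accumulator with a separately built prefix-XOR table of length n+1 that is then scanned pairwise (P[a]^P[b] for a<b), collecting the same set of subarray XORs.
import Mathlib
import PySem

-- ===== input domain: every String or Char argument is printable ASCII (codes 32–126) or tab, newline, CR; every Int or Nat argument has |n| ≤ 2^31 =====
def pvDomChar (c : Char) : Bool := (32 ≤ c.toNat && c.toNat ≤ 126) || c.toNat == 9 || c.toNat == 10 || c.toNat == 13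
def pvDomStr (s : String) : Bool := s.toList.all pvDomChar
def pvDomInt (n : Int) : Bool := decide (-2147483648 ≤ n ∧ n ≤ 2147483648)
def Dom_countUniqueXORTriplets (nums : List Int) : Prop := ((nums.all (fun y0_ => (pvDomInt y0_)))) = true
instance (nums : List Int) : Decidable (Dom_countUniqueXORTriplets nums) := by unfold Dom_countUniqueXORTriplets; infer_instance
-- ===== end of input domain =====

-- B replaces A's incremental inner XOR accumulator by a prefix-XOR table built in a
-- separate first pass, then scanned pairwise; same O(n^2) cost, alternative decomposition.

-- ===== PORT A =====
-- nums[j] is always in range (0 ≤ i ≤ j < len nums), so pyGetD is exact here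
def countUniqueXORTriplets (nums : List Int) : Int :=
  let n : Int := nums.length
  let seen : PySem.Set Int :=
    (PySem.List.pyRange 0 n 1).foldl (fun seen i =>
      ((PySem.List.pyRange i n 1).foldl
        (fun (st : Int × PySem.Set Int) j =>
          (PySem.Int.bxor st.1 (PySem.List.pyGetD nums j 0),
           st.2.add (PySem.Int.bxor st.1 (PySem.List.pyGetD nums j 0))))
        ((0 : Int), seen)).2) (PySem.Set.ofList [])
  (seen.length : Int)

-- ===== PORT B =====
-- prefix[-1], prefix[a], prefix[b] are always in range, so pyGetD is exact here
def countUniqueXORTriplets_alt (nums : List Int) : Int :=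
  let pfx : List Int :=
    nums.foldl (fun p x => p ++ [PySem.Int.bxor (PySem.List.pyGetD p (-1) 0) x]) [(0 : Int)]
  let n : Int := pfx.length
  let seen : PySem.Set Int :=
    (PySem.List.pyRange 0 n 1).foldl (fun seen a =>
      (PySem.List.pyRange (a + 1) n 1).foldl
        (fun (seen : PySem.Set Int) b =>
          seen.add (PySem.Int.bxor (PySem.List.pyGetD pfx a 0) (PySem.List.pyGetD pfx b 0)))
        seen) (PySem.Set.ofList [])
  (seen.length : Int)

-- ===== PRECONDITION & SPEC =====
def Spec_countUniqueXORTriplets (nums : List Int) (out : Int) : Prop := out = countUniqueXORTriplets_alt nums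
instance (nums : List Int) (out : Int) : Decidable (Spec_countUniqueXORTriplets nums out) := by unfold Spec_countUniqueXORTriplets; infer_instance

-- ===== CLAIM (what is proved, stated in full; the proofs are below) =====
def Claim_equal_countUniqueXORTriplets : Prop := ∀ (nums : List Int), Dom_countUniqueXORTriplets nums → Spec_countUniqueXORTriplets nums (countUniqueXORTriplets nums)

-- ===== LEMMAS AND PROOFS =====

-- sign/magnitude representation of Python's infinite two's-complement XOR
def pvMk (s : Bool) (m : Nat) : Int := if s then -(m : Int) - 1 else (m : Int)
def pvSgn (a : Int) : Bool := decide (a < 0)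
def pvMag (a : Int) : Nat := (if a < 0 then -a - 1 else a).toNat

lemma bxor_rep (a b : Int) :
    PySem.Int.bxor a b = pvMk (xor (pvSgn a) (pvSgn b)) (pvMag a ^^^ pvMag b) := by
  unfold PySem.Int.bxor pvMk pvSgn pvMag
  split_ifs with h1 h2 h3 <;> simp_all <;> omega

lemma sgn_pvMk (s : Bool) (m : Nat) : pvSgn (pvMk s m) = s := by
  cases s <;> simp [pvSgn, pvMk] <;> omega

lemma mag_pvMk (s : Bool) (m : Nat) : pvMag (pvMk s m) = m := by
  cases s <;> simp [pvMag, pvMk] <;> omega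

lemma bxor_assoc (a b c : Int) :
    PySem.Int.bxor (PySem.Int.bxor a b) c = PySem.Int.bxor a (PySem.Int.bxor b c) := by
  simp only [bxor_rep, sgn_pvMk, mag_pvMk, Bool.xor_assoc, Nat.xor_assoc]

-- prefix-XOR scan: pvScan l acc = [acc, acc^l0, acc^l0^l1, …]
def pvScan : List Int → Int → List Int
  | [], acc => [acc]
  | x :: t, acc => acc :: pvScan t (PySem.Int.bxor acc x)

lemma length_pvScan (l : List Int) (acc : Int) : (pvScan l acc).length = l.length + 1 := by
  induction l generalizing acc with
  | nil => rfl
  | cons x t ih => simp [pvScan, ih]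

lemma pyGetD_last (ys : List Int) (a d : Int) :
    PySem.List.pyGetD (ys ++ [a]) (-1) d = a := by
  simp [PySem.List.pyGetD, PySem.List.pyIdx?, PySem.List.pyGet?]

-- B's first pass builds exactly pvScan nums 0
lemma build_aux (l ys : List Int) (acc : Int) :
    l.foldl (fun p x => p ++ [PySem.Int.bxor (PySem.List.pyGetD p (-1) 0) x]) (ys ++ [acc])
      = ys ++ pvScan l acc := by
  induction l generalizing ys acc with
  | nil => simp [pvScan]
  | cons x t ih =>
      simp only [List.foldl_cons, pyGetD_last, pvScan]
      rw [ih (ys ++ [acc]) (PySem.Int.bxor acc x)]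
      simp

lemma scan_shift (l : List Int) (acc c : Int) :
    pvScan l (PySem.Int.bxor c acc) = (pvScan l acc).map (PySem.Int.bxor c) := by
  induction l generalizing acc with
  | nil => simp [pvScan]
  | cons x t ih => simp [pvScan, bxor_assoc, ih]

lemma drop_pvScan (a : Nat) (l : List Int) (acc : Int) (h : a ≤ l.length) :
    (pvScan l acc).drop a = pvScan (l.drop a) ((pvScan l acc).getD a 0) := by
  induction a generalizing l acc with
  | zero => cases l <;> simp [pvScan]
  | succ a ih =>
      cases l with
      | nil => simp at h
      | cons x t =>
          simp only [pvScan, List.drop_succ_cons, List.getD_cons_succ]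
          exact ih t _ (by simpa using h)

-- the values A's inner loop adds, in order
def pvAddAll : Int → List Int → PySem.Set Int → PySem.Set Int
  | _, [], s => s
  | acc, x :: t, s =>
      pvAddAll (PySem.Int.bxor acc x) t (s.add (PySem.Int.bxor acc x))

lemma foldl_pair (l : List Int) (acc : Int) (s : PySem.Set Int) :
    (l.foldl (fun (st : Int × PySem.Set Int) v =>
        (PySem.Int.bxor st.1 v, st.2.add (PySem.Int.bxor st.1 v))) (acc, s)).2
      = pvAddAll acc l s := by
  induction l generalizing acc s with
  | nil => rfl
  | cons x t ih => simp [pvAddAll, ih]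

lemma pvScan_cons (l : List Int) (acc : Int) : pvScan l acc = acc :: (pvScan l acc).tail := by
  cases l <;> rfl

lemma addAll_eq_scan (l : List Int) (acc : Int) (s : PySem.Set Int) :
    pvAddAll acc l s = ((pvScan l acc).tail).foldl PySem.Set.add s := by
  induction l generalizing acc s with
  | nil => rfl
  | cons x t ih =>
      show pvAddAll (PySem.Int.bxor acc x) t (s.add (PySem.Int.bxor acc x))
        = (pvScan t (PySem.Int.bxor acc x)).foldl PySem.Set.add s
      rw [ih, pvScan_cons t (PySem.Int.bxor acc x)]
      rfl

-- A's inner loop over j ∈ [i, n)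
lemma A_inner (nums : List Int) (i : Int) (h0 : 0 ≤ i) (s : PySem.Set Int) :
    ((PySem.List.pyRange i (nums.length : Int) 1).foldl
      (fun (st : Int × PySem.Set Int) j =>
        (PySem.Int.bxor st.1 (PySem.List.pyGetD nums j 0),
         st.2.add (PySem.Int.bxor st.1 (PySem.List.pyGetD nums j 0))))
      ((0 : Int), s)).2
    = ((pvScan (nums.drop i.toNat) 0).tail).foldl PySem.Set.add s := by
  rw [PySem.List.foldl_pyRange_pyGetD' nums 0
        (fun (st : Int × PySem.Set Int) v =>
          (PySem.Int.bxor st.1 v, st.2.add (PySem.Int.bxor st.1 v))) ((0 : Int), s) h0,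
      foldl_pair, addAll_eq_scan]

-- B's inner loop over b ∈ [a+1, n+1) adds the same values in the same order
lemma B_inner (nums : List Int) (P : List Int) (hP : P = pvScan nums 0)
    (a : Int) (h0 : 0 ≤ a) (h1 : a.toNat ≤ nums.length) (s : PySem.Set Int) :
    (PySem.List.pyRange (a + 1) (P.length : Int) 1).foldl
      (fun (s : PySem.Set Int) b =>
        s.add (PySem.Int.bxor (PySem.List.pyGetD P a 0) (PySem.List.pyGetD P b 0))) s
    = ((pvScan (nums.drop a.toNat) 0).tail).foldl PySem.Set.add s := by
  have hmap := PySem.List.map_pyGetD_pyRange' P 0 (a := a + 1) (by omega)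
  have hfm : ∀ (l : List Int),
      l.foldl (fun (s : PySem.Set Int) b =>
        s.add (PySem.Int.bxor (PySem.List.pyGetD P a 0) (PySem.List.pyGetD P b 0))) s
      = ((l.map (fun b => PySem.List.pyGetD P b 0)).map
          (fun v => PySem.Int.bxor (PySem.List.pyGetD P a 0) v)).foldl PySem.Set.add s := by
    intro l; rw [List.foldl_map, List.foldl_map]
  rw [hfm, hmap]
  have ht : (a + 1).toNat = a.toNat + 1 := by omega
  have hga : PySem.List.pyGetD P a 0 = P.getD a.toNat 0 :=
    PySem.List.pyGetD_of_nonneg P 0 h0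
  have hdropP : P.drop a.toNat = pvScan (nums.drop a.toNat) (P.getD a.toNat 0) := by
    rw [hP]; exact drop_pvScan a.toNat nums 0 h1
  have hdrop1 : P.drop (a + 1).toNat = (pvScan (nums.drop a.toNat) (P.getD a.toNat 0)).tail := by
    rw [ht, ← List.tail_drop, hdropP]
  rw [hdrop1, hga, List.map_tail, ← scan_shift, PySem.Int.bxor_self]

-- ===== VERDICT (by name: the statement is the Claim_ definition above) =====
theorem countUniqueXORTriplets_spec : Claim_equal_countUniqueXORTriplets := by
  intro nums _
  unfold Spec_countUniqueXORTriplets countUniqueXORTriplets countUniqueXORTriplets_alt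
  have hbuild : nums.foldl
      (fun p x => p ++ [PySem.Int.bxor (PySem.List.pyGetD p (-1) 0) x]) [(0 : Int)]
      = pvScan nums 0 := by
    simpa using build_aux nums [] 0
  simp only [hbuild]
  set P := pvScan nums 0 with hP
  have hlen : (P.length : Int) = (nums.length : Int) + 1 := by
    rw [hP, length_pvScan]; push_cast; ring
  congr 2
  -- split B's outer range: the last index a = nums.length contributes nothing
  have houter : PySem.List.pyRange 0 (P.length : Int) 1
      = PySem.List.pyRange 0 (nums.length : Int) 1 ++ [(nums.length : Int)] := by
    rw [hlen, PySem.List.pyRange_one_succ_right (by positivity)]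
  have hnil : PySem.List.pyRange ((nums.length : Int) + 1) (P.length : Int) 1 = [] :=
    PySem.List.pyRange_one_eq_nil (by rw [hlen])
  rw [houter, List.foldl_append]
  simp only [List.foldl_cons, List.foldl_nil, hnil]
  apply PySem.List.foldl_congr_mem
  intro s i hi
  have hmem := (PySem.List.mem_pyRange_one (a := 0) (b := (nums.length : Int)) (x := i)).1 hi
  rw [A_inner nums i hmem.1 s, B_inner nums P hP i hmem.1 (by omega) s]
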